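-- pv_equiv track=rewrite | github.com/permCoding/ege-22-23 | tasks/23/04.py | get
-- ===== SOURCE A (Python) =====
-- def get(x, y):
--     if x > y: return 0
--     if x == y: return 1
--     pos1 = x+1
--     pos2 = x+2
--     pos3 = x*2
--     way1 = get(pos1, y)
--     way2 = get(pos2, y)
--     way3 = get(pos3, y)
--     return way1 + way2 + way3
-- ===== SOURCE B (Python) =====
-- def get(x, y):
--     if x > y:
--         return 0
--     if x == y:
--         return 1
--     ways = {y: 1}
--     for t in range(y - 1, x - 1, -1):
--         d = 2 * t
--         ways[t] = ways.get(t + 1, 0) + ways.get(t + 2, 0) + (ways.get(d, 0) if d <= y else 0)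
--     return ways[x]
-- ===== Notes on version B (the rewrite author's own statement) =====
-- stated objective: alternative
-- what changed: Replaces A's three-way recursion get(x+1)+get(x+2)+get(2x) with a single descending dynamic-programming loop that fills a dict of path counts from y down to x.
import Mathlib
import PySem

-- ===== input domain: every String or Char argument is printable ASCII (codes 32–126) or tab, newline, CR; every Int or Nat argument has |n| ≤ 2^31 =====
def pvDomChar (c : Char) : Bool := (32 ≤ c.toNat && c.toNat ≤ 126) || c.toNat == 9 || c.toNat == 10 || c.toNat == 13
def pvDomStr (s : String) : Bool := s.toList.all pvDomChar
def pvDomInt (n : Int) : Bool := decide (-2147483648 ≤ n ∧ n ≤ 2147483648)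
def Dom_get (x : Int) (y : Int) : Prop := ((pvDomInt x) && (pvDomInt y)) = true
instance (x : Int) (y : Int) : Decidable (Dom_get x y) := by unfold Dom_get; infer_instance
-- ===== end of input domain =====

-- B replaces A's three-way recursion by a single descending DP loop over a dict of path counts.

-- ===== PORT A =====
-- A is a plain recursion; the fuel only makes it total in Lean: (y-x).toNat+1 steps always
-- suffice on Pre_ (proved below), and inputs where the fuel could run out (x ≤ 0 < y) are
-- exactly those where the Python A never terminates (RecursionError), excluded by Pre_.
def getFuel : Nat → Int → Int → Int
  | 0, _, _ => 0
  | f + 1, x, y =>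
    if x > y then 0
    else if x = y then 1
    else
      let pos1 := x + 1
      let pos2 := x + 2
      let pos3 := x * 2
      let way1 := getFuel f pos1 y
      let way2 := getFuel f pos2 y
      let way3 := getFuel f pos3 y
      way1 + way2 + way3

def get (x : Int) (y : Int) : Int := getFuel ((y - x).toNat + 1) x y

-- ===== PORT B =====
-- the body of B's for-loop: ways[t] = ways.get(t+1,0) + ways.get(t+2,0) + (ways.get(2*t,0) if 2*t<=y else 0)
def bStep (y : Int) (ways : PySem.Dict Int Int) (t : Int) : PySem.Dict Int Int :=
  let d := 2 * t
  ways.insert t (ways.getD (t + 1) 0 + ways.getD (t + 2) 0 + (if d ≤ y then ways.getD d 0 else 0))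

def get_alt (x : Int) (y : Int) : Int :=
  if x > y then 0
  else if x = y then 1
  else
    let init : PySem.Dict Int Int := PySem.Dict.empty.insert y 1
    let final := (PySem.List.pyRange (y - 1) (x - 1) (-1)).foldl (bStep y) init
    -- ways[x]: the key x is always present here (the loop is nonempty and ends at t = x)
    final.getD x 0

-- ===== PRECONDITION & SPEC =====
-- Pre_ excludes exactly the inputs x ≤ 0 < y, on which A recurses forever through x*2 and
-- dies with RecursionError (it never returns a value there).
def Pre_get (x : Int) (y : Int) : Prop := y ≤ x ∨ 1 ≤ x
instance (x : Int) (y : Int) : Decidable (Pre_get x y) := by unfold Pre_get; infer_instance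
def pvWitness_get : Int × Int := (1, 6)

def Spec_get (x : Int) (y : Int) (out : Int) : Prop := out = get_alt x y
instance (x : Int) (y : Int) (out : Int) : Decidable (Spec_get x y out) := by unfold Spec_get; infer_instance

-- ===== CLAIM (what is proved, stated in full; the proofs are below) =====
def Claim_equal_get : Prop := ∀ (x : Int) (y : Int), Dom_get x y → Pre_get x y → Spec_get x y (get x y)

-- ===== LEMMAS AND PROOFS =====

theorem getFuel_succ (f : Nat) (x y : Int) : getFuel (f + 1) x y =
    if x > y then 0 else if x = y then 1
    else getFuel f (x + 1) y + getFuel f (x + 2) y + getFuel f (x * 2) y := rfl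

-- any fuel above the threshold (y-x).toNat+1 computes the same value (for 1 ≤ x)
theorem getFuel_fuel_irrel : ∀ (f : Nat) (x y : Int), 1 ≤ x → (y - x).toNat + 1 ≤ f →
    getFuel f x y = getFuel ((y - x).toNat + 1) x y := by
  intro f
  induction f using Nat.strong_induction_on with
  | _ f ih =>
    intro x y hx hf
    match f, hf with
    | n + 1, hf =>
      simp only [getFuel]
      split_ifs with h1 h2
      · rfl
      · rfl
      · have hlt : x < y := by omega
        have hdbl : x + 1 ≤ x * 2 := by nlinarith
        have e1 : getFuel n (x+1) y = getFuel ((y-(x+1)).toNat + 1) (x+1) y :=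
          ih n (by omega) (x+1) y (by omega) (by omega)
        have e2 : getFuel n (x+2) y = getFuel ((y-(x+2)).toNat + 1) (x+2) y :=
          ih n (by omega) (x+2) y (by omega) (by omega)
        have e3 : getFuel n (x*2) y = getFuel ((y-(x*2)).toNat + 1) (x*2) y :=
          ih n (by omega) (x*2) y (by omega) (by omega)
        have m1 : getFuel ((y-x).toNat) (x+1) y = getFuel ((y-(x+1)).toNat + 1) (x+1) y :=
          ih ((y-x).toNat) (by omega) (x+1) y (by omega) (by omega)
        have m2 : getFuel ((y-x).toNat) (x+2) y = getFuel ((y-(x+2)).toNat + 1) (x+2) y :=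
          ih ((y-x).toNat) (by omega) (x+2) y (by omega) (by omega)
        have m3 : getFuel ((y-x).toNat) (x*2) y = getFuel ((y-(x*2)).toNat + 1) (x*2) y :=
          ih ((y-x).toNat) (by omega) (x*2) y (by omega) (by omega)
        simp only [e1, e2, e3, m1, m2, m3]

theorem get_of_gt (x y : Int) (h : y < x) : _root_.get x y = 0 := by
  unfold _root_.get
  rw [getFuel_succ, if_pos h]

theorem get_self (y : Int) : _root_.get y y = 1 := by
  unfold _root_.get
  rw [getFuel_succ, if_neg (by omega), if_pos rfl]

theorem get_rec (x y : Int) (hx : 1 ≤ x) (hxy : x < y) :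
    _root_.get x y = _root_.get (x + 1) y + _root_.get (x + 2) y + _root_.get (x * 2) y := by
  have hdbl : x + 1 ≤ x * 2 := by nlinarith
  unfold _root_.get
  rw [getFuel_succ, if_neg (by omega), if_neg (by omega),
      getFuel_fuel_irrel ((y - x).toNat) (x + 1) y (by omega) (by omega),
      getFuel_fuel_irrel ((y - x).toNat) (x + 2) y (by omega) (by omega),
      getFuel_fuel_irrel ((y - x).toNat) (x * 2) y (by omega) (by omega)]

-- the loop invariant: after processing down to t (exclusive), the dict holds _root_.get s y at all keys s > t
theorem fold_inv (x y : Int) (hx : 1 ≤ x) : ∀ (n : Nat) (t : Int), t = x - 1 + (n : Int) → t ≤ y - 1 →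
    ∀ d : PySem.Dict Int Int, (∀ s : Int, d.getD s 0 = if t < s then _root_.get s y else 0) →
    ∀ s : Int, ((PySem.List.pyRange t (x - 1) (-1)).foldl (bStep y) d).getD s 0 =
      if x - 1 < s then _root_.get s y else 0 := by
  intro n
  induction n with
  | zero =>
    intro t ht hty d hd s
    rw [PySem.List.pyRange_neg_one_eq_nil (by omega)]
    simpa [ht] using hd s
  | succ n ih =>
    intro t ht hty d hd s
    rw [PySem.List.pyRange_neg_one_cons (by omega)]
    simp only [List.foldl_cons]
    refine ih (t - 1) (by omega) (by omega) (bStep y d t) ?_ s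
    intro s'
    have htx : x ≤ t := by omega
    have w1 : d.getD (t + 1) 0 = _root_.get (t + 1) y := by
      rw [hd, if_pos (show t < t + 1 by omega)]
    have w2 : d.getD (t + 2) 0 = _root_.get (t + 2) y := by
      rw [hd, if_pos (show t < t + 2 by omega)]
    have w3 : (if 2 * t ≤ y then d.getD (2 * t) 0 else 0) = _root_.get (2 * t) y := by
      have h2t : t + 1 ≤ 2 * t := by nlinarith
      split_ifs with h
      · rw [hd, if_pos (show t < 2 * t by omega)]
      · rw [get_of_gt (2 * t) y (by omega)]
    have hw : _root_.get (t + 1) y + _root_.get (t + 2) y + _root_.get (2 * t) y = _root_.get t y := by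
      rw [get_rec t y (by omega) (by omega)]; ring_nf
    simp only [bStep, PySem.Dict.getD_insert, w1, w2, w3, hw]
    rw [hd s']
    by_cases hs : s' = t
    · rw [if_pos hs, if_pos (show t - 1 < s' by omega), hs]
    · rw [if_neg hs]
      by_cases h1 : t < s'
      · rw [if_pos h1, if_pos (by omega)]
      · rw [if_neg h1, if_neg (by omega)]

-- ===== VERDICT (by name: the statement is the Claim_ definition above) =====
theorem get_spec : Claim_equal_get := by
  intro x y _ hpre
  unfold Spec_get get_alt
  by_cases h1 : x > y
  · rw [if_pos h1, get_of_gt x y h1]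
  · rw [if_neg h1]
    by_cases h2 : x = y
    · rw [if_pos h2, h2, get_self]
    · have hx : 1 ≤ x := by rcases hpre with h | h <;> omega
      have hxy : x < y := by omega
      rw [if_neg h2]
      show _root_.get x y = ((PySem.List.pyRange (y - 1) (x - 1) (-1)).foldl (bStep y)
        (PySem.Dict.empty.insert y 1)).getD x 0
      have hinit : ∀ s : Int, (PySem.Dict.empty.insert y (1:Int)).getD s 0 =
          if (y - 1 : Int) < s then _root_.get s y else 0 := by
        intro s
        rw [PySem.Dict.getD_insert]
        by_cases hs : s = y
        · rw [if_pos hs, if_pos (show y - 1 < s by omega), hs, get_self]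
        · rw [if_neg hs]
          rw [PySem.Dict.getD_empty]
          by_cases hgt : (y - 1 : Int) < s
          · rw [if_pos hgt, get_of_gt s y (by omega)]
          · rw [if_neg hgt]
      have := fold_inv x y hx (y - x).toNat (y - 1) (by omega) (by omega)
        (PySem.Dict.empty.insert y 1) hinit x
      rw [this, if_pos (by omega : x - 1 < x)]
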